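-- pv_equiv track=rewrite | github.com/nordz0r/nopaste | src/main.py | order_recent_pastes
-- ===== SOURCE A (Python) =====
-- def order_recent_pastes(paste_ids: list[str]) -> list[str]:
--     ordered_ids: list[str] = []
--     seen: set[str] = set()
--
--     for paste_id in reversed(paste_ids):
--         if paste_id in seen:
--             continue
--         ordered_ids.append(paste_id)
--         seen.add(paste_id)
--
--     return ordered_ids
-- ===== SOURCE B (Python) =====
-- def order_recent_pastes(paste_ids: list[str]) -> list[str]:
--     # Two-pass: record each id's last-occurrence index, keep only last
--     # occurrences in a forward pass, then reverse.
--     last = {pid: i for i, pid in enumerate(paste_ids)}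
--     kept = [pid for i, pid in enumerate(paste_ids) if last[pid] == i]
--     kept.reverse()
--     return kept
-- ===== Notes on version B (the rewrite author's own statement) =====
-- stated objective: alternative
-- what changed: Replaces the reversed single pass with a seen-set by a two-pass forward scheme: build a last-occurrence index table with enumerate, keep each element only at its last index, then reverse the kept list.
import Mathlib
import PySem

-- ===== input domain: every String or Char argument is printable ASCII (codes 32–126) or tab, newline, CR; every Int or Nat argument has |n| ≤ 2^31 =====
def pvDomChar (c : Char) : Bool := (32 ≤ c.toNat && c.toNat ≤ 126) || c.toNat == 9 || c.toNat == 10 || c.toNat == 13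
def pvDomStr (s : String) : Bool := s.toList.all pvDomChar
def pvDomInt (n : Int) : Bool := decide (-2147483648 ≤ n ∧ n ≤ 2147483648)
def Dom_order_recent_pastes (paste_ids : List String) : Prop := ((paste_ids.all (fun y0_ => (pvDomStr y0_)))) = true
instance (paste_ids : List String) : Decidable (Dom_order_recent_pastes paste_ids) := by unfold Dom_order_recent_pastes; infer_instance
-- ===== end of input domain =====

-- B replaces A's reversed dedup pass (seen set) by a last-occurrence index
-- table + forward filter + reverse: a genuinely different decomposition, same cost.
-- ===== PORT A =====
def order_recent_pastes (paste_ids : List String) : List String :=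
  -- ordered_ids = []; seen = set(); for paste_id in reversed(paste_ids): ...
  (paste_ids.reverse.foldl
    (fun (st : List String × PySem.Set String) paste_id =>
      if PySem.Set.contains st.2 paste_id then st
      else (st.1 ++ [paste_id], PySem.Set.add st.2 paste_id))
    ([], PySem.Set.empty)).1

-- ===== PORT B =====
def order_recent_pastes_alt (paste_ids : List String) : List String :=
  -- last = {pid: i for i, pid in enumerate(paste_ids)}
  let last : PySem.Dict String Int :=
    (PySem.List.enumerate paste_ids).foldl (fun d p => d.insert p.2 p.1) PySem.Dict.empty
  -- kept = [pid for i, pid in enumerate(paste_ids) if last[pid] == i]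
  let kept : List String :=
    ((PySem.List.enumerate paste_ids).filter
      (fun p => last.get? p.2 == some p.1)).map (·.2)
  -- kept.reverse(); return kept
  kept.reverse

-- ===== PRECONDITION & SPEC =====
def Spec_order_recent_pastes (paste_ids : List String) (out : List String) : Prop := out = order_recent_pastes_alt paste_ids
instance (paste_ids : List String) (out : List String) : Decidable (Spec_order_recent_pastes paste_ids out) := by unfold Spec_order_recent_pastes; infer_instance

-- ===== CLAIM (what is proved, stated in full; the proofs are below) =====
def Claim_equal_order_recent_pastes : Prop := ∀ (paste_ids : List String), Dom_order_recent_pastes paste_ids → Spec_order_recent_pastes paste_ids (order_recent_pastes paste_ids)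

-- ===== LEMMAS AND PROOFS =====



-- the dict built by B's comprehension
def pvBuild (xs : List String) : PySem.Dict String Int :=
  (PySem.List.enumerate xs).foldl (fun d p => d.insert p.2 p.1) PySem.Dict.empty

-- kept list (forward order)
def pvKept (xs : List String) : List String :=
  ((PySem.List.enumerate xs).filter
    (fun p => (pvBuild xs).get? p.2 == some p.1)).map (·.2)

lemma pvAltEq (xs : List String) : order_recent_pastes_alt xs = (pvKept xs).reverse := rfl

lemma pvFoldPair (l : List String) (s : PySem.Set String) :
    l.foldl
      (fun (st : List String × PySem.Set String) paste_id =>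
        if PySem.Set.contains st.2 paste_id then st
        else (st.1 ++ [paste_id], PySem.Set.add st.2 paste_id))
      (s, s)
    = (l.foldl PySem.Set.add s, l.foldl PySem.Set.add s) := by
  induction l generalizing s with
  | nil => rfl
  | cons y l ih =>
      simp only [List.foldl_cons]
      by_cases h : PySem.Set.contains s y = true
      · rw [if_pos h]
        have hm : y ∈ s := by simpa using h
        have hadd : PySem.Set.add s y = s := by simp [PySem.Set.add, hm]
        rw [hadd]; exact ih s
      · rw [if_neg h]
        have hm : y ∉ s := by simpa using h
        have hadd : PySem.Set.add s y = s ++ [y] := by simp [PySem.Set.add, hm]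
        rw [hadd]; exact ih (s ++ [y])

lemma pvAEq (xs : List String) :
    order_recent_pastes xs = PySem.Set.ofList xs.reverse := by
  unfold order_recent_pastes
  rw [show (([] : List String), (PySem.Set.empty : PySem.Set String))
        = (([] : List String), ([] : List String)) from rfl]
  rw [pvFoldPair, PySem.Set.ofList_eq_foldl]

lemma pvBuildApp (xs : List String) (x : String) :
    pvBuild (xs ++ [x]) = (pvBuild xs).insert x (xs.length : Int) := by
  unfold pvBuild
  rw [PySem.List.enumerate_append]
  simp [PySem.List.enumerate_cons, PySem.List.enumerate_nil]

lemma pvKeptApp (xs : List String) (x : String) :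
    pvKept (xs ++ [x])
      = (pvKept xs).filter (fun y => !(y == x)) ++ [x] := by
  unfold pvKept
  rw [pvBuildApp, PySem.List.enumerate_append]
  simp only [PySem.List.enumerate_cons, PySem.List.enumerate_nil]
  rw [List.filter_append]
  have hlast : List.filter
      (fun p => ((pvBuild xs).insert x (xs.length : Int)).get? p.2 == some p.1)
      [((0 : Int) + xs.length, x)] = [((0 : Int) + xs.length, x)] := by
    simp [PySem.Dict.get?_insert_self]
  rw [hlast]
  have hcongr : List.filter
      (fun p => ((pvBuild xs).insert x (xs.length : Int)).get? p.2 == some p.1)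
      (PySem.List.enumerate xs 0)
      = List.filter
      (fun p => ((pvBuild xs).get? p.2 == some p.1) && !(p.2 == x))
      (PySem.List.enumerate xs 0) := by
    apply List.filter_congr
    intro p hp
    rcases (PySem.List.mem_enumerate_iff _ _ _).1 hp with ⟨k, hk, rfl⟩
    by_cases hx : xs[k] = x
    · simp [hx, PySem.Dict.get?_insert_self]
      omega
    · rw [PySem.Dict.get?_insert]
      simp [hx]
  rw [hcongr]
  rw [List.map_append]
  congr 1
  rw [List.filter_map, List.filter_filter]
  refine congrArg _ (List.filter_congr ?_)
  intro p _
  cases h : (pvBuild xs).get? p.2 == some p.1 <;> simp [Function.comp]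

lemma pvMain (xs : List String) :
    PySem.Set.ofList xs.reverse = (pvKept xs).reverse := by
  induction xs using List.reverseRecOn with
  | nil => rfl
  | append_singleton xs x ih =>
      rw [List.reverse_append, pvKeptApp, List.reverse_append]
      simp only [List.reverse_cons, List.reverse_nil, List.nil_append,
        List.singleton_append, PySem.Set.ofList_cons]
      rw [ih, PySem.Set.discard, ← List.filter_reverse]

-- ===== VERDICT (by name: the statement is the Claim_ definition above) =====
theorem order_recent_pastes_spec : Claim_equal_order_recent_pastes := by
  intro paste_ids _
  unfold Spec_order_recent_pastes
  rw [pvAEq, pvAltEq, pvMain]
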